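-- pv_equiv track=rewrite | github.com/hyu-likelion/WangsimLion | week1/gwon/2~4/problem5.py | solution
-- ===== SOURCE A (Python) =====
-- def solution(phone_book):
--     minNum = len(phone_book[0])                         # 가장 짧은 번호의 길이를 구하기 위해 초기화
--
--     for num in phone_book:                              # 가장 짧은 번호의 길이를 구해서 minNum에 넣기
--         if minNum > len(num) :
--             minNum = len(num)
--
--     for index in range(len(phone_book)):                # 가장 짧은 번호의 길이만큼 모든 번호 짜르기
--         phone_book[index] = phone_book[index][:minNum]
--
--     s1 = set(phone_book)                                # 중복을 제거해주기 위해 집합으로 만들기 s1과 phone_book의 요소의 개수가 같으면 중복되는 번호가 없는 것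
--     return len(s1)==len(phone_book)
-- ===== SOURCE B (Python) =====
-- def solution(phone_book):
--     # Mutates phone_book in place (truncation), like the original.
--     m = min(map(len, phone_book))
--     phone_book[:] = [num[:m] for num in phone_book]
--     srt = sorted(phone_book)
--     return all(srt[i] != srt[i + 1] for i in range(len(srt) - 1))
-- ===== Notes on version B (the rewrite author's own statement) =====
-- stated objective: alternative
-- what changed: Duplicate detection by sorting the truncated list and scanning adjacent pairs instead of building a set and comparing cardinalities; the minimum length is computed with min(map(len,...)) and the truncation is a single slice-assignment comprehension instead of an explicit index loop.
import Mathlib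
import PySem

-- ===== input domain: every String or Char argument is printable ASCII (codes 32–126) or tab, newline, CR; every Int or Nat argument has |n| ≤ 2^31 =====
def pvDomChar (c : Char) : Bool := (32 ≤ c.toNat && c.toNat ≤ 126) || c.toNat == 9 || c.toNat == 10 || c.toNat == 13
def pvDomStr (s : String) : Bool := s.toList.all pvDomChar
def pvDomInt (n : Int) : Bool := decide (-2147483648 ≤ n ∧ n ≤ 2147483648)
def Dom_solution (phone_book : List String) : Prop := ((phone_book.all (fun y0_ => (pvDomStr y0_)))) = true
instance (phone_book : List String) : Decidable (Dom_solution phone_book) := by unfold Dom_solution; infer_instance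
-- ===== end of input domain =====

-- B replaces the set-cardinality duplicate test by sort-and-adjacent-scan (and computes the minimum
-- length / truncation with min+comprehension); both A and B mutate phone_book in place identically
-- (truncation to the minimum length) — the equivalence proved here is about the return value.

-- ===== PORT A =====
def solution (phone_book : List String) : Bool :=
  match PySem.List.pyGet? phone_book 0 with
  | none => false  -- phone_book[0] raises IndexError on []; excluded by Pre_solution
  | some first =>
    let minNum := phone_book.foldl
      (fun minNum num => if minNum > PySem.Str.len num then PySem.Str.len num else minNum)
      (PySem.Str.len first)
    let pb2 := (PySem.List.pyRange 0 (phone_book.length : Int) 1).foldl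
      (fun acc index =>
        PySem.List.pySetD acc index
          (PySem.Str.slice (PySem.List.pyGetD acc index "") none (some minNum)))
      phone_book
    PySem.Set.len (PySem.Set.ofList pb2) == (pb2.length : Int)

-- ===== PORT B =====
def solution_alt (phone_book : List String) : Bool :=
  match PySem.List.min? (phone_book.map PySem.Str.len) (fun x => x) with
  | none => false  -- min() raises ValueError on []; excluded by Pre_solution
  | some m =>
    let pb2 := phone_book.map (fun num => PySem.Str.slice num none (some m))
    let srt := PySem.List.sorted pb2 (fun x => x) false
    (PySem.List.pyRange 0 ((srt.length : Int) - 1) 1).all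
      (fun i => !(PySem.List.pyGetD srt i "" == PySem.List.pyGetD srt (i + 1) ""))

-- ===== PRECONDITION & SPEC =====
-- Pre_ excludes only the empty list, on which A raises IndexError (and B raises ValueError).
def Pre_solution (phone_book : List String) : Prop := phone_book ≠ []
instance (phone_book : List String) : Decidable (Pre_solution phone_book) := by
  unfold Pre_solution; infer_instance

def pvWitness_solution : List String := ["119", "97674223", "1195524421"]

def Spec_solution (phone_book : List String) (out : Bool) : Prop := out = solution_alt phone_book
instance (phone_book : List String) (out : Bool) : Decidable (Spec_solution phone_book out) := by
  unfold Spec_solution; infer_instance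

-- ===== CLAIM (what is proved, stated in full; the proofs are below) =====
def Claim_equal_solution : Prop := ∀ (phone_book : List String), Dom_solution phone_book →
  Pre_solution phone_book → Spec_solution phone_book (solution phone_book)

-- ===== LEMMAS AND PROOFS =====

-- A's in-place truncation loop is map-over-the-list (each index is written exactly once).
theorem trunc_loop (f : String → String) (post : List String) : ∀ (pre : List String),
    (PySem.List.pyRange (pre.length : Int) ((pre.length + post.length : Nat) : Int) 1).foldl
      (fun acc index =>
        PySem.List.pySetD acc index (f (PySem.List.pyGetD acc index ""))) (pre ++ post)
    = pre ++ post.map f := by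
  induction post with
  | nil => intro pre; simp [PySem.List.pyRange_one_eq_nil]
  | cons x post ih =>
    intro pre
    rw [PySem.List.pyRange_one_cons (by push_cast [List.length_cons]; omega)]
    simp only [List.foldl_cons]
    have hget : PySem.List.pyGetD (pre ++ x :: post) (pre.length : Int) "" = x := by
      simp [PySem.List.pyGetD_natCast, List.getD_eq_getElem?_getD]
    have hset : PySem.List.pySetD (pre ++ x :: post) (pre.length : Int) (f x)
        = (pre ++ [f x]) ++ post := by
      simp [PySem.List.pySetD_natCast]
    rw [hget, hset]
    have hlen : ((pre.length : Int) + 1) = ((pre ++ [f x]).length : Int) := by simp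
    have hb : (((pre.length + (x :: post).length : Nat)) : Int)
        = (((pre ++ [f x]).length + post.length : Nat) : Int) := by simp; omega
    rw [hlen, hb, ih (pre ++ [f x])]
    simp

-- A's running-minimum loop body is `min`.
theorem min_loop (t : List String) : ∀ (i : Int),
    t.foldl (fun m num => if m > PySem.Str.len num then PySem.Str.len num else m) i
    = (t.map PySem.Str.len).foldl min i := by
  induction t with
  | nil => intro i; rfl
  | cons x t ih =>
    intro i
    simp only [List.map_cons, List.foldl_cons]
    rw [ih]
    congr 1
    simp only [min_def]
    split_ifs <;> omega

-- set(xs) has as many elements as xs exactly when xs has no duplicates.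
theorem foldl_add_sublist (xs : List String) : ∀ s : List String,
    (xs.foldl PySem.Set.add s).Sublist (s ++ xs) := by
  induction xs with
  | nil => intro s; simp
  | cons x xs ih =>
    intro s
    simp only [List.foldl_cons]
    refine (ih (PySem.Set.add s x)).trans ?_
    show ((if s.contains x then s else s ++ [x]) ++ xs).Sublist (s ++ x :: xs)
    split
    · exact List.Sublist.append_left (List.sublist_cons_self x xs) s
    · simp

theorem set_card_eq_nodup (xs : List String) :
    (PySem.Set.len (PySem.Set.ofList xs) == (xs.length : Int)) = decide xs.Nodup := by
  by_cases h : xs.Nodup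
  · simp [h, PySem.Set.ofList_eq_self_of_nodup xs h, PySem.Set.len]
  · simp [h]
    intro hlen
    have hsub : (PySem.Set.ofList xs).Sublist xs := by
      rw [PySem.Set.ofList_eq_foldl]; simpa using foldl_add_sublist xs []
    have := hsub.eq_of_length hlen
    exact h (this ▸ PySem.Set.nodup_ofList xs)

-- on a ≤-sorted list, "no two adjacent entries equal" is exactly Nodup.
theorem chain_ne_iff_nodup (l : List String) (hp : l.Pairwise (· ≤ ·)) :
    List.IsChain (· ≠ ·) l ↔ l.Nodup := by
  induction l with
  | nil => simp
  | cons x t ih =>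
    cases t with
    | nil => simp
    | cons y t =>
      rw [List.isChain_cons_cons, List.nodup_cons]
      rw [List.pairwise_cons] at hp
      constructor
      · rintro ⟨hxy, hc⟩
        have hnd := (ih hp.2).mp hc
        refine ⟨?_, hnd⟩
        have hxlty : x < y := lt_of_le_of_ne (hp.1 y (by simp)) hxy
        intro hmem
        rcases List.mem_cons.mp hmem with h1 | h2
        · exact hxy h1
        · exact absurd hxlty (not_lt.mpr ((List.pairwise_cons.mp hp.2).1 x h2))
      · rintro ⟨hmem, hnd⟩
        exact ⟨fun h => hmem (h ▸ List.mem_cons_self), (ih hp.2).mpr hnd⟩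

-- B's index scan, on the Nat side.
theorem adjNat : ∀ (l : List String),
    ((List.range (l.length - 1)).all (fun k => !(l.getD k "" == l.getD (k+1) ""))) =
    decide (List.IsChain (· ≠ ·) l) := by
  intro l
  induction l with
  | nil => simp
  | cons x t ih =>
    cases t with
    | nil => simp
    | cons y t =>
      rw [show (x :: y :: t).length - 1 = ((y :: t).length - 1) + 1 by simp]
      rw [List.range_succ_eq_map]
      simp only [List.all_cons, List.all_map, List.isChain_cons_cons]
      rw [show decide (x ≠ y ∧ List.IsChain (· ≠ ·) (y :: t))
            = (decide (x ≠ y) && decide (List.IsChain (· ≠ ·) (y :: t))) from by simp]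
      rw [← ih]
      congr 1
      rw [Bool.eq_iff_iff]
      simp

theorem adj_all_eq_chain (l : List String) :
    ((PySem.List.pyRange 0 ((l.length : Int) - 1) 1).all
      (fun i => !(PySem.List.pyGetD l i "" == PySem.List.pyGetD l (i + 1) ""))) =
    decide (List.IsChain (· ≠ ·) l) := by
  cases l with
  | nil =>
    rw [PySem.List.pyRange_one_eq_nil (by norm_num)]
    simp
  | cons x t =>
    rw [show (((x :: t).length : Int) - 1) = (((x :: t).length - 1 : Nat) : Int) by simp [List.length_cons]]
    rw [PySem.List.pyRange_zero_natCast]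
    rw [List.all_map]
    rw [← adjNat]
    congr 1
    funext k
    have h1 : ((k : Int) + 1) = ((k + 1 : Nat) : Int) := by push_cast; ring
    simp only [Function.comp_apply, h1, PySem.List.pyGetD_natCast]

-- ===== VERDICT (by name: the statement is the Claim_ definition above) =====
theorem solution_spec : Claim_equal_solution := by
  intro pb _ hpre
  unfold Spec_solution
  cases pb with
  | nil => exact absurd rfl hpre
  | cons h t =>
    have hget : PySem.List.pyGet? (h :: t) 0 = some h := by simp [pysem]
    have hminB : PySem.List.min? ((h :: t).map PySem.Str.len) (fun x => x)
        = some ((t.map PySem.Str.len).foldl min (PySem.Str.len h)) := by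
      rw [List.map_cons, PySem.List.min?_id_cons]
    have hminA :
        (h :: t).foldl (fun m num => if m > PySem.Str.len num then PySem.Str.len num else m)
          (PySem.Str.len h)
        = (t.map PySem.Str.len).foldl min (PySem.Str.len h) := by
      rw [List.foldl_cons]
      rw [show (if PySem.Str.len h > PySem.Str.len h then PySem.Str.len h else PySem.Str.len h)
            = PySem.Str.len h from by simp]
      exact min_loop t _
    unfold solution solution_alt
    rw [hget, hminB]
    simp only [hminA]
    have htr := trunc_loop
      (fun num => PySem.Str.slice num none (some ((t.map PySem.Str.len).foldl min (PySem.Str.len h))))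
      (h :: t) []
    simp only [List.length_nil, List.nil_append, Nat.cast_zero, Nat.zero_add, List.map_cons] at htr
    rw [htr]
    rw [set_card_eq_nodup, adj_all_eq_chain]
    have hiff := (chain_ne_iff_nodup _
        (PySem.List.sorted_pairwise
          ((h :: t).map (fun num =>
            PySem.Str.slice num none (some ((t.map PySem.Str.len).foldl min (PySem.Str.len h)))))
          (fun x => x))).trans
      (PySem.List.sorted_perm
        ((h :: t).map (fun num =>
          PySem.Str.slice num none (some ((t.map PySem.Str.len).foldl min (PySem.Str.len h)))))
        (fun x => x) false).nodup_iff
    exact (decide_eq_decide.mpr hiff).symm
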